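-- pv_equiv track=rewrite | github.com/souvik03-136/PatchPilot | agents/context_agent.py | _analyze_commit_history
-- ===== SOURCE A (Python) =====
-- def _analyze_commit_history(history: list) -> str:
--     patterns = {
--         "security_fixes": sum(
--             1 for c in history
--             if "fix" in c.get("message", "").lower() and "security" in c.get("message", "").lower()
--         ),
--         "bug_fixes": sum(
--             1 for c in history
--             if "fix" in c.get("message", "").lower() and "bug" in c.get("message", "").lower()
--         ),
--         "features": sum(
--             1 for c in history
--             if "feat" in c.get("message", "").lower() or "feature" in c.get("message", "").lower()
--         )
--     }
--
--     return "\n".join([f"{k}: {v} occurrences" for k, v in patterns.items()])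
-- ===== SOURCE B (Python) =====
-- def _analyze_commit_history(history: list) -> str:
--     sec = bug = feat = 0
--     for c in history:
--         msg = c.get("message", "").lower()
--         if "fix" in msg and "security" in msg:
--             sec += 1
--         if "fix" in msg and "bug" in msg:
--             bug += 1
--         if "feat" in msg or "feature" in msg:
--             feat += 1
--     return (f"security_fixes: {sec} occurrences\n"
--             f"bug_fixes: {bug} occurrences\n"
--             f"features: {feat} occurrences")
-- ===== Notes on version B (the rewrite author's own statement) =====
-- stated objective: alternative
-- what changed: Replaces three independent scans of history (each calling c.get('message','').lower() twice per commit) with a single pass that lowercases each message once and updates three counters, then formats the fixed-key result directly instead of building a dict.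
import Mathlib
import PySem

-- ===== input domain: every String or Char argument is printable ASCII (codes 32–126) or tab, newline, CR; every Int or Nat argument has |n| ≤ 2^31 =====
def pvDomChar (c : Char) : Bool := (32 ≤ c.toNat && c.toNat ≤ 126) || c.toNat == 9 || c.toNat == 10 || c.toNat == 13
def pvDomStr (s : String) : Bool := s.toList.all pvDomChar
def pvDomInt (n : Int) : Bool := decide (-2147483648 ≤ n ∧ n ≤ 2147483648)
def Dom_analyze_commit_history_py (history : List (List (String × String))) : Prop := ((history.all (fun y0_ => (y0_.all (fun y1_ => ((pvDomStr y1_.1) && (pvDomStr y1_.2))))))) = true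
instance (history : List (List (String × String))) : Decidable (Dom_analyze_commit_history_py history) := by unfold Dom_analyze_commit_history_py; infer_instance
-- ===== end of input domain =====

-- B: one pass over history keeping three counters (message lowercased once per commit) and direct
-- formatting of the fixed keys, instead of A's three comprehensions and dict; same output string.

-- c.get("message", "").lower()  (shared by both ports: both Pythons contain this exact expression)
def pvMsg (c : List (String × String)) : String :=
  PySem.Str.lower ((PySem.Dict.ofList c).getD "message" "")

-- ===== PORT A =====
def analyze_commit_history_py (history : List (List (String × String))) : String :=
  let sec : Int := history.foldl (fun acc c =>
    if PySem.Str.isIn "fix" (pvMsg c) && PySem.Str.isIn "security" (pvMsg c) then acc + 1 else acc) 0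
  let bug : Int := history.foldl (fun acc c =>
    if PySem.Str.isIn "fix" (pvMsg c) && PySem.Str.isIn "bug" (pvMsg c) then acc + 1 else acc) 0
  let feat : Int := history.foldl (fun acc c =>
    if PySem.Str.isIn "feat" (pvMsg c) || PySem.Str.isIn "feature" (pvMsg c) then acc + 1 else acc) 0
  let patterns := ((PySem.Dict.empty.insert "security_fixes" sec).insert "bug_fixes" bug).insert "features" feat
  PySem.Str.join "\n" (patterns.items.map (fun kv => kv.1 ++ ": " ++ PySem.Int.toStr kv.2 ++ " occurrences"))

-- ===== PORT B =====
def analyze_commit_history_py_alt (history : List (List (String × String))) : String :=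
  let t : Int × Int × Int := history.foldl (fun acc c =>
    let msg := pvMsg c
    ((if PySem.Str.isIn "fix" msg && PySem.Str.isIn "security" msg then acc.1 + 1 else acc.1),
     (if PySem.Str.isIn "fix" msg && PySem.Str.isIn "bug" msg then acc.2.1 + 1 else acc.2.1),
     (if PySem.Str.isIn "feat" msg || PySem.Str.isIn "feature" msg then acc.2.2 + 1 else acc.2.2))) (0, 0, 0)
  "security_fixes: " ++ PySem.Int.toStr t.1 ++ " occurrences\n" ++
  "bug_fixes: " ++ PySem.Int.toStr t.2.1 ++ " occurrences\n" ++
  "features: " ++ PySem.Int.toStr t.2.2 ++ " occurrences"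

-- ===== PRECONDITION & SPEC =====
def Spec_analyze_commit_history_py (history : List (List (String × String))) (out : String) : Prop := out = analyze_commit_history_py_alt history
instance (history : List (List (String × String))) (out : String) : Decidable (Spec_analyze_commit_history_py history out) := by unfold Spec_analyze_commit_history_py; infer_instance

-- ===== CLAIM (what is proved, stated in full; the proofs are below) =====
def Claim_equal_analyze_commit_history_py : Prop := ∀ (history : List (List (String × String))), Dom_analyze_commit_history_py history → Spec_analyze_commit_history_py history (analyze_commit_history_py history)

-- ===== LEMMAS AND PROOFS =====

-- the fused fold of B equals the triple of A's three folds
theorem pv_fold_split (history : List (List (String × String))) (s b f : Int) :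
    history.foldl (fun acc c =>
      let msg := pvMsg c
      ((if PySem.Str.isIn "fix" msg && PySem.Str.isIn "security" msg then acc.1 + 1 else acc.1),
       (if PySem.Str.isIn "fix" msg && PySem.Str.isIn "bug" msg then acc.2.1 + 1 else acc.2.1),
       (if PySem.Str.isIn "feat" msg || PySem.Str.isIn "feature" msg then acc.2.2 + 1 else acc.2.2))) (s, b, f)
    = (history.foldl (fun acc c =>
        if PySem.Str.isIn "fix" (pvMsg c) && PySem.Str.isIn "security" (pvMsg c) then acc + 1 else acc) s,
       history.foldl (fun acc c =>
        if PySem.Str.isIn "fix" (pvMsg c) && PySem.Str.isIn "bug" (pvMsg c) then acc + 1 else acc) b,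
       history.foldl (fun acc c =>
        if PySem.Str.isIn "feat" (pvMsg c) || PySem.Str.isIn "feature" (pvMsg c) then acc + 1 else acc) f) := by
  induction history generalizing s b f with
  | nil => rfl
  | cons c rest ih => simp only [List.foldl_cons]; exact ih _ _ _

-- A's dict-then-join formatting equals B's direct concatenation
theorem pv_format_eq (s b f : Int) :
    PySem.Str.join "\n"
      ((((PySem.Dict.empty.insert "security_fixes" s).insert "bug_fixes" b).insert "features" f).items.map
        (fun kv => kv.1 ++ ": " ++ PySem.Int.toStr kv.2 ++ " occurrences"))
    = "security_fixes: " ++ PySem.Int.toStr s ++ " occurrences\n" ++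
      "bug_fixes: " ++ PySem.Int.toStr b ++ " occurrences\n" ++
      "features: " ++ PySem.Int.toStr f ++ " occurrences" := by
  have h : (((PySem.Dict.empty.insert "security_fixes" s).insert "bug_fixes" b).insert "features" f).items
      = [("security_fixes", s), ("bug_fixes", b), ("features", f)] := rfl
  rw [h]
  apply String.toList_inj.mp
  simp [PySem.Str.join, PySem.Chars.join, List.intercalate, PySem.Int.toList_toStr]

-- ===== VERDICT (by name: the statement is the Claim_ definition above) =====
theorem analyze_commit_history_py_spec : Claim_equal_analyze_commit_history_py := by
  intro history _
  unfold Spec_analyze_commit_history_py analyze_commit_history_py analyze_commit_history_py_alt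
  rw [pv_fold_split]
  exact pv_format_eq _ _ _
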